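-- pv_equiv track=rewrite | github.com/rctzeng/AlgorithmDataStructuresPractice | Leetcode/MinimumUniqueWordAbbreviation_411.py | computeLength
-- ===== SOURCE A (Python) =====
-- def computeLength(word):
--     digits = [str(i) for i in range(10)]
--     # each character and "number" has length 1
--     l, c = 0, 0
--     for w in word:
--         if w in digits: c+=1
--         else:
--             if c>0: l, c = l+1, 0
--             l+=1
--     if c>0: l+=1
--     return l
-- ===== SOURCE B (Python) =====
-- def computeLength(word):
--     digits = set("0123456789")
--     total = 0
--     i = 0
--     n = len(word)
--     while i < n:
--         if word[i] in digits:
--             while i < n and word[i] in digits: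
--                 i += 1
--             total += 1
--         else:
--             j = i
--             while i < n and word[i] not in digits:
--                 i += 1
--             total += i - j
--     return total
-- ===== Notes on version B (the rewrite author's own statement) =====
-- stated objective: alternative
-- what changed: Replaced A's per-character fold with a running digit counter and boundary flushing by an explicit two-pointer run scanner: each maximal digit run contributes 1 and each non-digit run its length.
import Mathlib
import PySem

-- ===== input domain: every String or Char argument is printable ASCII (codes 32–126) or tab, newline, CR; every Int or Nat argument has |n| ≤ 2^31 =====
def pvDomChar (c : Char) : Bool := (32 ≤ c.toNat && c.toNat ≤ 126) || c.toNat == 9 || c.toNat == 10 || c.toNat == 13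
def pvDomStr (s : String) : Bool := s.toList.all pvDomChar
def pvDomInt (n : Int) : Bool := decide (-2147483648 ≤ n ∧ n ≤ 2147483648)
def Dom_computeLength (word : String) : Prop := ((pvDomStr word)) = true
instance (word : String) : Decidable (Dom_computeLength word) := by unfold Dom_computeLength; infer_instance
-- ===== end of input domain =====

-- B replaces A's per-character counter-and-flush fold with an explicit two-pointer scan over
-- maximal digit / non-digit runs (each digit run counts 1, each non-digit run its length);
-- objective: alternative decomposition, same O(n) cost.

-- ===== PORT A =====
-- digits = [str(i) for i in range(10)]
def pyDigits : List String := (PySem.List.pyRange 0 10 1).map PySem.Int.toStr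

-- one step of A's loop body over the state (l, c)
def stepA (lc : Int × Int) (w : Char) : Int × Int :=
  if pyDigits.contains (String.ofList [w]) then (lc.1, lc.2 + 1)
  else if lc.2 > 0 then (lc.1 + 1 + 1, 0) else (lc.1 + 1, lc.2)

def computeLength (word : String) : Int :=
  let r := word.toList.foldl stepA (0, 0)
  if r.2 > 0 then r.1 + 1 else r.1

-- ===== PORT B =====
-- digits = set("0123456789")
def altDigits : PySem.Set Char := PySem.Set.ofList "0123456789".toList

def altIsDig (c : Char) : Bool := PySem.Set.contains altDigits c

-- the two-pointer run scanner: the inner while-loops of Source B advance i over one maximal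
-- run (dropWhile); a digit run adds 1, a non-digit run adds its length (i - j)
def altGo (cs : List Char) : Int :=
  match cs with
  | [] => 0
  | c :: rest =>
    if altIsDig c then 1 + altGo (rest.dropWhile altIsDig)
    else (1 + (rest.takeWhile (fun y => !altIsDig y)).length) + altGo (rest.dropWhile (fun y => !altIsDig y))
termination_by cs.length
decreasing_by
  · have := List.length_dropWhile_le altIsDig rest; simp; omega
  · have := List.length_dropWhile_le (fun y => !altIsDig y) rest; simp; omega

def computeLength_alt (word : String) : Int := altGo word.toList

-- ===== PRECONDITION & SPEC =====
def Spec_computeLength (word : String) (out : Int) : Prop := out = computeLength_alt word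
instance (word : String) (out : Int) : Decidable (Spec_computeLength word out) := by unfold Spec_computeLength; infer_instance

-- ===== CLAIM (what is proved, stated in full; the proofs are below) =====
def Claim_equal_computeLength : Prop := ∀ (word : String), Dom_computeLength word → Spec_computeLength word (computeLength word)

-- ===== LEMMAS AND PROOFS =====
def digLits : List Char := ['0','1','2','3','4','5','6','7','8','9']

theorem pyDigits_eq : pyDigits = digLits.map (String.ofList [·]) := by decide

theorem altIsDig_eq (c : Char) : altIsDig c = digLits.contains c := by
  have h : altDigits = digLits := by decide
  simp [altIsDig, h]

-- A's membership test agrees with B's key function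
theorem memDig (c : Char) : pyDigits.contains (String.ofList [c]) = altIsDig c := by
  rw [pyDigits_eq, altIsDig_eq]
  have h : ∀ d : Char, (String.ofList [c] == String.ofList [d]) = (c == d) := by
    intro d; simp [String.ofList_inj]
  simp only [digLits, List.map, List.contains_cons, List.contains_nil, h]

-- a non-digit head contributes exactly 1 to altGo
theorem altGo_cons_nondigit (c : Char) (cs : List Char) (h : altIsDig c = false) :
    altGo (c :: cs) = 1 + altGo cs := by
  match cs with
  | [] => simp [altGo, h]
  | y :: ys =>
    by_cases hy : altIsDig y
    · simp [altGo, h, hy, List.takeWhile, List.dropWhile]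
    · rw [altGo, altGo]
      simp [h, hy, List.takeWhile, List.dropWhile]
      omega

theorem altGo_drop_digit (c : Char) (cs : List Char) (h : altIsDig c = true) :
    (c :: cs).dropWhile altIsDig = cs.dropWhile altIsDig := by
  simp [List.dropWhile, h]

-- the loop invariant relating A's fold state to B's run scanner
theorem foldA_eq (cs : List Char) : ∀ l c : Int, 0 ≤ c →
    (if (cs.foldl stepA (l, c)).2 > 0 then (cs.foldl stepA (l, c)).1 + 1 else (cs.foldl stepA (l, c)).1)
      = l + (if c > 0 then 1 + altGo (cs.dropWhile altIsDig) else altGo cs) := by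
  induction cs with
  | nil =>
    intro l c _
    by_cases hc : c > 0 <;> simp [altGo, hc]
  | cons x xs ih =>
    intro l c hc
    have hmem : (String.ofList [x] ∈ pyDigits) ↔ (altIsDig x = true) := by
      simp [← memDig x]
    by_cases hx : altIsDig x
    · have hstep : stepA (l, c) x = (l, c + 1) := by simp [stepA, hmem, hx]
      rw [List.foldl_cons, hstep, ih l (c + 1) (by omega)]
      have h1 : c + 1 > 0 := by omega
      by_cases hcpos : c > 0
      · simp [h1, hcpos, altGo_drop_digit x xs hx]
      · have : c = 0 := by omega
        simp [h1, hcpos, altGo, hx]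
    · have hx' : altIsDig x = false := by simpa using hx
      by_cases hcpos : c > 0
      · have hstep : stepA (l, c) x = (l + 1 + 1, 0) := by simp [stepA, hmem, hx', hcpos]
        rw [List.foldl_cons, hstep, ih (l + 1 + 1) 0 (by omega)]
        simp [hcpos, List.dropWhile, hx', altGo_cons_nondigit x xs hx']
        omega
      · have hstep : stepA (l, c) x = (l + 1, c) := by simp [stepA, hmem, hx', hcpos]
        have hc0 : c = 0 := by omega
        rw [List.foldl_cons, hstep, ih (l + 1) c hc]
        simp [hcpos, altGo_cons_nondigit x xs hx']
        omega

-- ===== VERDICT (by name: the statement is the Claim_ definition above) =====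
theorem computeLength_spec : Claim_equal_computeLength := by
  intro word _
  unfold Spec_computeLength computeLength computeLength_alt
  have := foldA_eq word.toList 0 0 (by omega)
  simpa using this
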